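-- pv_equiv track=rewrite | github.com/Seo-Faper/codeforce | python/1081.py | p1019
-- ===== SOURCE A (Python) =====
-- def p1019(N):
--
--     counts = [0 for _ in range(10)]
--
--     weight = 1
--     for step in range(len(str(N))):
--         replaced = int(str(N // 10) + "9")
--         remaining = replaced - N
--         for i in range(len(counts)): counts[i] += (N // 10 + 1) * weight
--         for i in range(10-remaining, 10): counts[i] -= weight
--         for number in list(str(N)[:-1]):
--             number = int(number)
--             counts[number] -= remaining * weight
--
--         counts[0] -= weight
--
--         N //= 10
--         weight *= 10
--     ans = 0
--     for i in range(1,10):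
--         ans += i * counts[i]
--
--     return ans
-- ===== SOURCE B (Python) =====
-- def p1019(N):
--     total = 0
--     pv = 1
--     while pv <= N:
--         high = N // (pv * 10)
--         cur = (N // pv) % 10
--         low = N % pv
--         total += high * 45 * pv + cur * (cur - 1) // 2 * pv + cur * (low + 1)
--         pv *= 10
--     return total
-- ===== Notes on version B (the rewrite author's own statement) =====
-- stated objective: simpler
-- what changed: Replaces A's string-based frequency-array bookkeeping (a counts[10] array updated by three inner loops over digit strings per step) with the standard per-place closed-form contribution summed over powers of ten.
-- crash fix: On negative N, A raises ValueError (int('-') while scanning str(N)[:-1]); B's while loop never runs there and B returns its initial total. — e.g. on p1019(-1): A raises ValueError, B returns 0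
import Mathlib
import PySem

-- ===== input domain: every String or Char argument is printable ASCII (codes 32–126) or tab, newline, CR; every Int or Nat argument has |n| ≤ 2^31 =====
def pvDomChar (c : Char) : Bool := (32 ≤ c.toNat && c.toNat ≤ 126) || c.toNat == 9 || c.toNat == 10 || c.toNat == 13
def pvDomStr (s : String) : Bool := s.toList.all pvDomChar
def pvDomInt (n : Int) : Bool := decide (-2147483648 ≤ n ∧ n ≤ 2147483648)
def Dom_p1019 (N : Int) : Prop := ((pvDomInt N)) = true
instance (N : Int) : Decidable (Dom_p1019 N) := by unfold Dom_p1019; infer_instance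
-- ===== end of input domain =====

-- B replaces A's string-based digit-frequency bookkeeping with the standard per-place
-- closed-form contribution, summed over powers of ten (objective: simpler).

-- ===== PORT A =====
-- int(s) ported by hand: PySem.Int.ofChars? hides its digit loop behind a private helper the
-- proofs cannot unfold, so the one int() call on a NON-literal string is transcribed step for
-- step.  pvInt? is exact for the strings this program feeds it, i.e. str(m) + "9" for an int m
-- (an optional '-' followed by decimal digits): no whitespace, '+' or '_' ever occurs there.
def pvDigitsVal? (cs : List Char) : Option Nat :=
  if cs ≠ [] ∧ cs.all Char.isDigit then
    some (cs.foldl (fun a c => 10 * a + (c.toNat - 48)) 0)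
  else none

def pvInt? (cs : List Char) : Option Int :=
  if cs.head? = some '-' then (pvDigitsVal? cs.tail).map (fun n => -(n : Int))
  else (pvDigitsVal? cs).map (fun n => (n : Int))

-- one iteration of A's main loop, acting on the state (counts, N, weight)
def p1019Body (st : List Int × Int × Int) : List Int × Int × Int :=
  let counts := st.1
  let N := st.2.1
  let weight := st.2.2
  let replaced := (pvInt? (PySem.Int.toChars (PySem.Int.floordiv N 10) ++ ['9'])).getD 0
  let remaining := replaced - N
  let counts := (PySem.List.pyRange 0 (counts.length : Int) 1).foldl
      (fun cs i => PySem.List.pySetD cs i (PySem.List.pyGetD cs i 0 + (PySem.Int.floordiv N 10 + 1) * weight)) counts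
  let counts := (PySem.List.pyRange (10 - remaining) 10 1).foldl
      (fun cs i => PySem.List.pySetD cs i (PySem.List.pyGetD cs i 0 - weight)) counts
  let counts := (PySem.List.slice (PySem.Int.toChars N) none (some (-1))).foldl
      (fun cs ch =>
        let number := (PySem.Int.ofChars? [ch]).getD 0
        PySem.List.pySetD cs number (PySem.List.pyGetD cs number 0 - remaining * weight)) counts
  let counts := PySem.List.pySetD counts 0 (PySem.List.pyGetD counts 0 0 - weight)
  (counts, PySem.Int.floordiv N 10, weight * 10)

def p1019 (N : Int) : Int :=
  let counts : List Int := (PySem.List.pyRange 0 10 1).map (fun _ => (0 : Int))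
  let st := (PySem.List.pyRange 0 ((PySem.Int.toChars N).length : Int) 1).foldl
      (fun st _step => p1019Body st) (counts, N, 1)
  (PySem.List.pyRange 1 10 1).foldl (fun ans i => ans + i * PySem.List.pyGetD st.1 i 0) 0

-- ===== PORT B =====
def p1019AltGo (N pv : Int) (hpv : 0 < pv) (total : Int) : Int :=
  if h : pv ≤ N then
    let high := PySem.Int.floordiv N (pv * 10)
    let cur := PySem.Int.mod (PySem.Int.floordiv N pv) 10
    let low := PySem.Int.mod N pv
    p1019AltGo N (pv * 10) (by omega)
      (total + high * 45 * pv + PySem.Int.floordiv (cur * (cur - 1)) 2 * pv + cur * (low + 1))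
  else total
termination_by (N + 1 - pv).toNat
decreasing_by all_goals omega

def p1019_alt (N : Int) : Int := p1019AltGo N 1 (by norm_num) 0

-- ===== PRECONDITION & SPEC =====
-- Pre_ excludes exactly the inputs on which the Python A raises: every N < 0 hits
-- int('-') (a ValueError) while scanning list(str(N)[:-1]).
def Pre_p1019 (N : Int) : Prop := 0 ≤ N
instance (N : Int) : Decidable (Pre_p1019 N) := by unfold Pre_p1019; infer_instance
def pvWitness_p1019 : Int := 37

-- On negative N, A raises ValueError (int('-') while scanning str(N)[:-1]); B's while loop
-- never runs there and B returns its initial total.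
def Raises_p1019 (N : Int) : Prop := N < 0
instance (N : Int) : Decidable (Raises_p1019 N) := by unfold Raises_p1019; infer_instance
def pvRaiseWitness_p1019 : Int := -1
def pvRaiseWitnessOut_p1019 : Int := 0

def Spec_p1019 (N : Int) (out : Int) : Prop := out = p1019_alt N
instance (N : Int) (out : Int) : Decidable (Spec_p1019 N out) := by unfold Spec_p1019; infer_instance

-- ===== CLAIM (what is proved, stated in full; the proofs are below) =====
def Claim_equal_p1019 : Prop := ∀ (N : Int), Dom_p1019 N → Pre_p1019 N → Spec_p1019 N (p1019 N)
def Claim_raises_p1019 : Prop := (∀ (N : Int), Dom_p1019 N → Raises_p1019 N → ¬ Pre_p1019 N) ∧ (Dom_p1019 (pvRaiseWitness_p1019) ∧ Raises_p1019 (pvRaiseWitness_p1019) ∧ p1019_alt (pvRaiseWitness_p1019) = pvRaiseWitnessOut_p1019)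


-- ===== LEMMAS AND PROOFS =====

-- ---- proof-side reference functions ----

-- the decimal digit characters of a natural number (most significant first)
def decD (m : Nat) : List Char :=
  if h : m < 10 then [Nat.digitChar m] else decD (m / 10) ++ [Nat.digitChar (m % 10)]
termination_by m
decreasing_by all_goals omega

-- digit sum of a non-negative integer
def digSum (n : Int) : Int :=
  if h : n ≤ 0 then 0 else digSum (n / 10) + n % 10
termination_by n.toNat
decreasing_by all_goals omega

-- per-step contribution of A's loop at weight 1
def gA (n : Int) : Int :=
  45 * (n / 10) + (n % 10) * ((n % 10) + 1) / 2 - (9 - n % 10) * digSum (n / 10)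

-- the common reference value: digit sum of all integers 0..n
def TT (n : Int) : Int :=
  if h : n ≤ 0 then 0 else gA n + 10 * TT (n / 10)
termination_by n.toNat
decreasing_by all_goals omega

-- the weighted digit-frequency sum A extracts from its counts array
def wsum (cs : List Int) : Int :=
  (PySem.List.pyRange 1 10 1).foldl (fun ans i => ans + i * PySem.List.pyGetD cs i 0) 0

-- trailing digit sums used to relate B's loop to digSum
def dtail (n pv : Int) (hpv : 0 < pv) : Int :=
  if h : pv ≤ n then (n / pv) % 10 + dtail n (pv * 10) (by omega) else 0
termination_by (n + 1 - pv).toNat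
decreasing_by all_goals omega

-- ---- digSum unfoldings ----

theorem digSum_nonpos {n : Int} (h : n ≤ 0) : digSum n = 0 := by
  rw [digSum]; simp [h]

theorem digSum_pos {n : Int} (h : 0 < n) : digSum n = digSum (n / 10) + n % 10 := by
  rw [digSum]; rw [dif_neg (by omega)]

theorem digitChar_facts : ∀ k, k < 10 →
    ((Nat.digitChar k).toNat - 48 = k ∧ (Nat.digitChar k).isDigit = true ∧ Nat.digitChar k ≠ '-') := by
  decide

-- ---- decD facts ----

theorem decD_lt {m : Nat} (h : m < 10) : decD m = [Nat.digitChar m] := by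
  rw [decD]; simp [h]

theorem decD_ge {m : Nat} (h : 10 ≤ m) :
    decD m = decD (m / 10) ++ [Nat.digitChar (m % 10)] := by
  rw [decD]; simp [Nat.not_lt.2 h]

theorem tdc_eq (m : Nat) : ∀ (f : Nat) (acc : List Char), m < f →
    Nat.toDigitsCore 10 f m acc = decD m ++ acc := by
  induction m using Nat.strong_induction_on with
  | _ m ih =>
    intro f acc hf
    match f, hf with
    | f + 1, hf =>
      rw [Nat.toDigitsCore]
      by_cases h10 : m < 10
      · have hq : m / 10 = 0 := Nat.div_eq_of_lt h10
        simp [hq, decD_lt h10, Nat.mod_eq_of_lt h10]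
      · have h10' : 10 ≤ m := Nat.not_lt.1 h10
        have hne : ¬ m / 10 = 0 := by omega
        simp only [hne, if_false]
        rw [ih (m / 10) (by omega) f ((m % 10).digitChar :: acc) (by omega)]
        rw [decD_ge h10']
        simp

theorem toChars_nonneg {n : Int} (h : 0 ≤ n) : PySem.Int.toChars n = decD n.toNat := by
  unfold PySem.Int.toChars
  rw [if_neg (by omega)]
  unfold Nat.toDigits
  rw [tdc_eq _ _ _ (by omega)]
  simp

theorem decD_shape (m : Nat) : ∃ ms : List Nat, ms ≠ [] ∧
    decD m = ms.map Nat.digitChar ∧ (∀ k ∈ ms, k < 10) ∧ (ms.sum : Int) = digSum (m : Int) := by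
  induction m using Nat.strong_induction_on with
  | _ m ih =>
    by_cases h10 : m < 10
    · refine ⟨[m], by simp, by rw [decD_lt h10]; simp, by simpa using h10, ?_⟩
      by_cases hm0 : m = 0
      · subst hm0; simp [digSum_nonpos]
      · rw [digSum_pos (by exact_mod_cast Nat.pos_of_ne_zero hm0)]
        have h1 : (m : Int) / 10 = 0 := by omega
        rw [h1, digSum_nonpos le_rfl]
        simp; omega
    · obtain ⟨ms, hne, hmap, hlt, hsum⟩ := ih (m / 10) (by omega)
      refine ⟨ms ++ [m % 10], by simp, ?_, ?_, ?_⟩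
      · rw [decD_ge (by omega), hmap]; simp
      · intro k hk
        rcases List.mem_append.1 hk with hk | hk
        · exact hlt k hk
        · simp at hk; omega
      · rw [digSum_pos (by exact_mod_cast (by omega : 0 < m))]
        have h1 : (m : Int) / 10 = ((m / 10 : Nat) : Int) := by omega
        have h2 : (m : Int) % 10 = ((m % 10 : Nat) : Int) := by omega
        rw [h1, h2, ← hsum, List.sum_append]
        push_cast
        simp

theorem decD_dropLast_lt {m : Nat} (h : m < 10) : (decD m).dropLast = [] := by
  rw [decD_lt h]; rfl

theorem decD_dropLast_ge {m : Nat} (h : 10 ≤ m) : (decD m).dropLast = decD (m / 10) := by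
  rw [decD_ge h]; simp

theorem decD_length_lt {m : Nat} (h : m < 10) : (decD m).length = 1 := by
  rw [decD_lt h]; rfl

theorem decD_length_ge {m : Nat} (h : 10 ≤ m) :
    (decD m).length = (decD (m / 10)).length + 1 := by
  rw [decD_ge h]; simp

-- ---- the hand-ported int() on the strings that occur ----

theorem dval_decD (m : Nat) :
    (decD m).foldl (fun a c => 10 * a + (c.toNat - 48)) 0 = m := by
  induction m using Nat.strong_induction_on with
  | _ m ih =>
    by_cases h10 : m < 10
    · rw [decD_lt h10]
      simp [(digitChar_facts m h10).1]
    · rw [decD_ge (by omega), List.foldl_append, ih (m / 10) (by omega)]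
      simp [(digitChar_facts (m % 10) (by omega)).1]
      omega

theorem pvInt?_decD9 (m : Nat) :
    pvInt? (decD m ++ ['9']) = some ((10 * m + 9 : Nat) : Int) := by
  obtain ⟨ms, hne, hmap, hlt, -⟩ := decD_shape m
  obtain ⟨k0, ms', rfl⟩ : ∃ x t, ms = x :: t := by
    cases ms with
    | nil => exact absurd rfl hne
    | cons x t => exact ⟨x, t, rfl⟩
  unfold pvInt?
  rw [if_neg (by
    rw [hmap]
    simp only [List.map_cons, List.cons_append, List.head?_cons, Option.some.injEq]
    exact (digitChar_facts k0 (hlt k0 (by simp))).2.2)]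
  unfold pvDigitsVal?
  rw [if_pos ⟨by simp, by
    rw [hmap, List.all_append, Bool.and_eq_true]
    constructor
    · rw [List.all_eq_true]
      intro c hc
      obtain ⟨k, hk, rfl⟩ := List.mem_map.1 hc
      exact (digitChar_facts k (hlt k hk)).2.1
    · decide⟩]
  rw [List.foldl_append, dval_decD]
  rfl

-- ---- wsum facts ----

theorem ten_exists {cs : List Int} (h : cs.length = 10) :
    ∃ a0 a1 a2 a3 a4 a5 a6 a7 a8 a9, cs = [a0, a1, a2, a3, a4, a5, a6, a7, a8, a9] := by
  rcases cs with _ | ⟨a0, cs⟩; · simp at h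
  rcases cs with _ | ⟨a1, cs⟩; · simp at h
  rcases cs with _ | ⟨a2, cs⟩; · simp at h
  rcases cs with _ | ⟨a3, cs⟩; · simp at h
  rcases cs with _ | ⟨a4, cs⟩; · simp at h
  rcases cs with _ | ⟨a5, cs⟩; · simp at h
  rcases cs with _ | ⟨a6, cs⟩; · simp at h
  rcases cs with _ | ⟨a7, cs⟩; · simp at h
  rcases cs with _ | ⟨a8, cs⟩; · simp at h
  rcases cs with _ | ⟨a9, cs⟩; · simp at h
  rcases cs with _ | ⟨a10, cs⟩
  · exact ⟨a0, a1, a2, a3, a4, a5, a6, a7, a8, a9, rfl⟩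
  · simp at h

theorem pyRange_one_ten : PySem.List.pyRange 1 10 1 = [1, 2, 3, 4, 5, 6, 7, 8, 9] := by
  decide

theorem wsum_update {cs : List Int} (h : cs.length = 10) {i : Int} (h0 : 0 ≤ i) (h9 : i < 10)
    (v : Int) :
    wsum (PySem.List.pySetD cs i (PySem.List.pyGetD cs i 0 + v)) = wsum cs + i * v := by
  obtain ⟨a0, a1, a2, a3, a4, a5, a6, a7, a8, a9, rfl⟩ := ten_exists h
  interval_cases i <;>
    (simp [wsum, pyRange_one_ten, PySem.List.pySetD_of_nonneg, PySem.List.pyGetD,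
      PySem.List.pyGet?, PySem.List.pyIdx?]; try ring)

theorem wsum_foldl_idx (idxs : List Int) (v : Int) :
    ∀ (cs : List Int), cs.length = 10 → (∀ i ∈ idxs, 0 ≤ i ∧ i < 10) →
    (idxs.foldl (fun cs i => PySem.List.pySetD cs i (PySem.List.pyGetD cs i 0 + v)) cs).length = 10 ∧
    wsum (idxs.foldl (fun cs i => PySem.List.pySetD cs i (PySem.List.pyGetD cs i 0 + v)) cs)
      = wsum cs + idxs.sum * v := by
  induction idxs with
  | nil => intro cs h _; simpa using h
  | cons i t ih =>
    intro cs h hb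
    obtain ⟨hi0, hi9⟩ := hb i (by simp)
    have hlen' : (PySem.List.pySetD cs i (PySem.List.pyGetD cs i 0 + v)).length = 10 := by
      rw [PySem.List.length_pySetD]; exact h
    obtain ⟨ihl, ihw⟩ := ih _ hlen' (fun j hj => hb j (by simp [hj]))
    refine ⟨by simpa using ihl, ?_⟩
    simp only [List.foldl_cons] at *
    rw [ihw, wsum_update h hi0 hi9 v, List.sum_cons]
    ring

theorem ofChars_digitChar : ∀ k, k < 10 → PySem.Int.ofChars? [Nat.digitChar k] = some (k : Int) := by
  decide

theorem wsum_foldl_chars (ms : List Nat) (rw : Int) :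
    ∀ (cs : List Int), cs.length = 10 → (∀ k ∈ ms, k < 10) →
    ((ms.map Nat.digitChar).foldl
        (fun cs ch => PySem.List.pySetD cs ((PySem.Int.ofChars? [ch]).getD 0)
          (PySem.List.pyGetD cs ((PySem.Int.ofChars? [ch]).getD 0) 0 - rw)) cs).length = 10 ∧
    wsum ((ms.map Nat.digitChar).foldl
        (fun cs ch => PySem.List.pySetD cs ((PySem.Int.ofChars? [ch]).getD 0)
          (PySem.List.pyGetD cs ((PySem.Int.ofChars? [ch]).getD 0) 0 - rw)) cs)
      = wsum cs - (ms.sum : Int) * rw := by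
  induction ms with
  | nil => intro cs h _; simpa using h
  | cons k t ih =>
    intro cs h hb
    have hk : k < 10 := hb k (by simp)
    have hnum : (PySem.Int.ofChars? [Nat.digitChar k]).getD 0 = (k : Int) := by
      rw [ofChars_digitChar k hk]; rfl
    simp only [List.map_cons, List.foldl_cons, hnum]
    have hupd : PySem.List.pySetD cs (k : Int) (PySem.List.pyGetD cs (k : Int) 0 - rw)
        = PySem.List.pySetD cs (k : Int) (PySem.List.pyGetD cs (k : Int) 0 + (-rw)) := by
      ring_nf
    have hlen' : (PySem.List.pySetD cs (k : Int) (PySem.List.pyGetD cs (k : Int) 0 - rw)).length = 10 := by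
      rw [PySem.List.length_pySetD]; exact h
    obtain ⟨ihl, ihw⟩ := ih _ hlen' (fun j hj => hb j (by simp [hj]))
    refine ⟨ihl, ?_⟩
    rw [ihw, hupd, wsum_update h (by exact_mod_cast Nat.zero_le k) (by exact_mod_cast hk) (-rw),
      List.sum_cons]
    push_cast
    ring

-- ---- A's loop body and loop ----

theorem sum_pyRange_r (r : Int) (h0 : 0 ≤ r) (h9 : r < 10) :
    (PySem.List.pyRange (r + 1) 10 1).sum = 45 - r * (r + 1) / 2 := by
  interval_cases r <;> decide

theorem bodyA_spec {cs : List Int} (hlen : cs.length = 10) {n : Int} (hn : 0 ≤ n) (w : Int) :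
    ∃ cs', p1019Body (cs, n, w) = (cs', n / 10, w * 10) ∧ cs'.length = 10 ∧
      wsum cs' = wsum cs + w * gA n := by
  have hq0 : (0 : Int) ≤ n / 10 := by omega
  have hr0 : (0 : Int) ≤ n % 10 := by omega
  have hr9 : n % 10 < 10 := by omega
  have hq10 : PySem.Int.floordiv n 10 = n / 10 := PySem.Int.floordiv_eq_ediv_of_pos (by norm_num)
  have hrepl : (pvInt? (PySem.Int.toChars (PySem.Int.floordiv n 10) ++ ['9'])).getD 0
      = 10 * (n / 10) + 9 := by
    rw [hq10, toChars_nonneg hq0, pvInt?_decD9]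
    simp
    omega
  unfold p1019Body
  simp only [hlen]
  rw [hrepl]
  simp only [hq10]
  rw [show (10 : Int) * (n / 10) + 9 - n = 9 - n % 10 by omega]
  rw [show PySem.List.pyRange 0 ((10 : Nat) : Int) 1 = [0,1,2,3,4,5,6,7,8,9] by decide]
  rw [show (10 : Int) - (9 - n % 10) = n % 10 + 1 by ring]
  rw [toChars_nonneg hn, PySem.List.slice_to_neg_one]
  obtain ⟨hl1, hw1⟩ := wsum_foldl_idx [0,1,2,3,4,5,6,7,8,9] ((n / 10 + 1) * w) cs hlen (by decide)
  have hfun2 : (fun (cs : List Int) (i : Int) =>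
        PySem.List.pySetD cs i (PySem.List.pyGetD cs i 0 - w))
      = (fun (cs : List Int) (i : Int) =>
        PySem.List.pySetD cs i (PySem.List.pyGetD cs i 0 + (-w))) := by
    funext cs i; rw [sub_eq_add_neg]
  rw [hfun2]
  obtain ⟨hl2, hw2⟩ := wsum_foldl_idx (PySem.List.pyRange (n % 10 + 1) 10 1) (-w) _ hl1
    (by intro i hi; rw [PySem.List.mem_pyRange_one] at hi; omega)
  rw [sum_pyRange_r (n % 10) hr0 hr9] at hw2
  by_cases hn10 : n < 10
  · -- one-digit case: str(N)[:-1] is empty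
    rw [decD_dropLast_lt (by omega)]
    simp only [List.foldl_nil]
    rw [sub_eq_add_neg (PySem.List.pyGetD _ 0 0) w]
    refine ⟨_, rfl, ?_, ?_⟩
    · rw [PySem.List.length_pySetD]; exact hl2
    · rw [wsum_update hl2 le_rfl (by norm_num) (-w), hw2, hw1]
      have hq : n / 10 = 0 := by omega
      unfold gA
      rw [hq, digSum_nonpos le_rfl]
      generalize (n % 10) * (n % 10 + 1) / 2 = t
      rw [show ([0,1,2,3,4,5,6,7,8,9] : List Int).sum = 45 from by decide]
      ring
  · -- multi-digit case: str(N)[:-1] lists the digits of N // 10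
    rw [decD_dropLast_ge (by omega), show n.toNat / 10 = (n / 10).toNat by omega]
    obtain ⟨ms, hne, hmap, hklt, hsum⟩ := decD_shape (n / 10).toNat
    rw [hmap]
    obtain ⟨hl3, hw3⟩ := wsum_foldl_chars ms ((9 - n % 10) * w) _ hl2 hklt
    rw [sub_eq_add_neg (PySem.List.pyGetD _ 0 0) w]
    refine ⟨_, rfl, ?_, ?_⟩
    · rw [PySem.List.length_pySetD]; exact hl3
    · rw [wsum_update hl3 le_rfl (by norm_num) (-w), hw3, hw2, hw1]
      have hds : (ms.sum : Int) = digSum (n / 10) := by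
        rw [hsum, show (((n / 10).toNat : Nat) : Int) = n / 10 by omega]
      rw [hds]
      unfold gA
      generalize (n % 10) * (n % 10 + 1) / 2 = t
      generalize digSum (n / 10) = d
      rw [show ([0,1,2,3,4,5,6,7,8,9] : List Int).sum = 45 from by decide]
      ring

theorem TT_nonpos {n : Int} (h : n ≤ 0) : TT n = 0 := by
  rw [TT]; simp [h]

theorem TT_pos {n : Int} (h : 0 < n) : TT n = gA n + 10 * TT (n / 10) := by
  rw [TT]; rw [dif_neg (by omega)]

theorem foldl_const {α β : Type} (f : α → α) (l : List β) (st : α) :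
    l.foldl (fun st _ => f st) st = f^[l.length] st := by
  induction l generalizing st with
  | nil => rfl
  | cons x t ih =>
    rw [List.foldl_cons, List.length_cons, Function.iterate_succ_apply]
    exact ih (f st)

theorem loopA (n : Int) (cs : List Int) (w : Int) (hn : 0 ≤ n) (hlen : cs.length = 10) :
    wsum (p1019Body^[(decD n.toNat).length] (cs, n, w)).1 = wsum cs + w * TT n := by
  by_cases h10 : n < 10
  · rw [decD_length_lt (by omega), Function.iterate_one]
    obtain ⟨cs', heq, hlen', hw⟩ := bodyA_spec hlen hn w
    rw [heq]
    by_cases h0 : n = 0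
    · subst h0
      rw [TT_nonpos le_rfl]
      simpa [gA, digSum_nonpos] using hw
    · rw [TT_pos (show (0:Int) < n by omega), show n / 10 = 0 by omega, TT_nonpos le_rfl]
      simpa using hw
  · rw [decD_length_ge (by omega), show n.toNat / 10 = (n / 10).toNat by omega,
      Function.iterate_succ_apply]
    obtain ⟨cs', heq, hlen', hw⟩ := bodyA_spec hlen hn w
    rw [heq, loopA (n / 10) cs' (w * 10) (by omega) hlen', hw, TT_pos (show (0:Int) < n by omega)]
    ring
termination_by n.toNat
decreasing_by all_goals omega

theorem p1019_eq_TT {n : Int} (hn : 0 ≤ n) : p1019 n = TT n := by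
  show wsum (((PySem.List.pyRange 0 (((PySem.Int.toChars n).length : Nat) : Int) 1).foldl
      (fun st _step => p1019Body st)
      ((PySem.List.pyRange 0 10 1).map (fun _ => (0 : Int)), n, 1))).1 = TT n
  rw [toChars_nonneg hn, foldl_const, PySem.List.length_pyRange_one]
  rw [show ((((decD n.toNat).length : Int) - 0)).toNat = (decD n.toNat).length by omega]
  rw [loopA n _ 1 hn (by decide)]
  rw [show wsum ((PySem.List.pyRange 0 10 1).map (fun _ => (0 : Int))) = 0 from by decide]
  ring

-- ---- B's loop ----

-- the closed-form contribution B adds for one place value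
def fB (n pv : Int) : Int :=
  PySem.Int.floordiv n (pv * 10) * 45 * pv
    + PySem.Int.floordiv (PySem.Int.mod (PySem.Int.floordiv n pv) 10 *
        (PySem.Int.mod (PySem.Int.floordiv n pv) 10 - 1)) 2 * pv
    + PySem.Int.mod (PySem.Int.floordiv n pv) 10 * (PySem.Int.mod n pv + 1)

theorem go_step {n pv : Int} (hpv : 0 < pv) (h : pv ≤ n) (t : Int) :
    p1019AltGo n pv hpv t = p1019AltGo n (pv * 10) (by omega) (t + fB n pv) := by
  rw [p1019AltGo, dif_pos h]
  simp only [fB]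
  congr 1
  ring

theorem go_stop {n pv : Int} (hpv : 0 < pv) (h : ¬ pv ≤ n) (t : Int) :
    p1019AltGo n pv hpv t = t := by
  rw [p1019AltGo, dif_neg h]

theorem dtail_pos {n pv : Int} (hpv : 0 < pv) (h : pv ≤ n) :
    dtail n pv hpv = (n / pv) % 10 + dtail n (pv * 10) (by omega) := by
  rw [dtail, dif_pos h]

theorem dtail_neg {n pv : Int} (hpv : 0 < pv) (h : ¬ pv ≤ n) : dtail n pv hpv = 0 := by
  rw [dtail, dif_neg h]

theorem dtail_congr {n pv pv' : Int} (hpv : 0 < pv) (h : pv = pv') :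
    dtail n pv hpv = dtail n pv' (h ▸ hpv) := by
  subst h; rfl

theorem go_congr {n pv pv' t : Int} (hpv : 0 < pv) (h : pv = pv') :
    p1019AltGo n pv hpv t = p1019AltGo n pv' (h ▸ hpv) t := by
  subst h; rfl

theorem fB_eq {n pv : Int} (hpv : 0 < pv) :
    fB n pv = (n / (pv * 10)) * 45 * pv + ((n / pv) % 10 * ((n / pv) % 10 - 1)) / 2 * pv
      + (n / pv) % 10 * (n % pv + 1) := by
  unfold fB
  rw [PySem.Int.floordiv_eq_ediv_of_pos (by omega), PySem.Int.floordiv_eq_ediv_of_pos hpv,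
    PySem.Int.mod_eq_emod_of_pos (by norm_num), PySem.Int.mod_eq_emod_of_pos hpv,
    PySem.Int.floordiv_eq_ediv_of_pos (by norm_num)]

theorem emod_split {n pv : Int} (hn : 0 ≤ n) (hpv : 0 < pv) :
    n % (10 * pv) = 10 * ((n / 10) % pv) + n % 10 := by
  have h1 : n = (10 * ((n / 10) % pv) + n % 10) + (10 * pv) * ((n / 10) / pv) := by
    have h2 : pv * ((n / 10) / pv) + (n / 10) % pv = n / 10 := Int.ediv_add_emod (n / 10) pv
    have h3 : (10 * pv) * ((n / 10) / pv) = 10 * (pv * ((n / 10) / pv)) := by ring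
    rw [h3]
    omega
  conv_lhs => rw [h1]
  rw [Int.add_mul_emod_self_left]
  have hb1 : 0 ≤ (n / 10) % pv := Int.emod_nonneg _ (by omega)
  have hb2 : (n / 10) % pv < pv := Int.emod_lt_of_pos _ hpv
  exact Int.emod_eq_of_lt (by omega) (by omega)

theorem fB_key {n pv : Int} (hn : 0 ≤ n) (hpv : 0 < pv) :
    fB n (10 * pv) = 10 * fB (n / 10) pv - (9 - n % 10) * (((n / 10) / pv) % 10) := by
  rw [fB_eq (by omega), fB_eq hpv]
  rw [show (10 : Int) * pv * 10 = 10 * (pv * 10) by ring]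
  rw [← Int.ediv_ediv_of_nonneg (by norm_num : (0:Int) ≤ 10) (x := n) (z := pv * 10)]
  rw [← Int.ediv_ediv_of_nonneg (by norm_num : (0:Int) ≤ 10) (x := n) (z := pv)]
  rw [emod_split hn hpv]
  generalize (n / 10) / pv / 10 = high
  generalize hc : ((n / 10) / pv) % 10 = c
  generalize (c * (c - 1)) / 2 = t
  generalize (n / 10) % pv = m
  have hr : n % 10 = n % 10 := rfl
  generalize n % 10 = r at *
  ring

theorem go_acc (n pv : Int) (hpv : 0 < pv) : ∀ t, p1019AltGo n pv hpv t = t + p1019AltGo n pv hpv 0 := by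
  intro t
  by_cases h : pv ≤ n
  · rw [go_step hpv h t, go_step hpv h 0,
      go_acc n (pv * 10) (by omega) (t + fB n pv), go_acc n (pv * 10) (by omega) (0 + fB n pv)]
    ring
  · rw [go_stop hpv h, go_stop hpv h]
    ring
termination_by (n + 1 - pv).toNat
decreasing_by all_goals omega

theorem dtail_shift (n pv : Int) (hpv : 0 < pv) (hn : 0 ≤ n) :
    dtail n (10 * pv) (by omega) = dtail (n / 10) pv hpv := by
  by_cases h : pv ≤ n / 10
  · have h' : 10 * pv ≤ n := by omega
    rw [dtail_pos (by omega) h', dtail_pos hpv h]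
    rw [← Int.ediv_ediv_of_nonneg (by norm_num : (0:Int) ≤ 10) (x := n) (z := pv)]
    rw [dtail_congr (by omega) (show (10 : Int) * pv * 10 = 10 * (pv * 10) by ring)]
    rw [dtail_shift n (pv * 10) (by omega) hn]
  · have h' : ¬ 10 * pv ≤ n := by omega
    rw [dtail_neg (by omega) h', dtail_neg hpv h]
termination_by (n + 1 - pv).toNat
decreasing_by all_goals omega

theorem dtail_one (n : Int) (hn : 0 ≤ n) : dtail n 1 (by omega) = digSum n := by
  by_cases h : (1 : Int) ≤ n
  · rw [dtail_pos (by omega) h,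
      dtail_congr (by omega) (show (1 : Int) * 10 = 10 * 1 by ring),
      dtail_shift n 1 (by omega) hn, dtail_one (n / 10) (by omega),
      digSum_pos (show (0:Int) < n by omega), Int.ediv_one]
    ring
  · rw [dtail_neg (by omega) h, digSum_nonpos (by omega)]
termination_by n.toNat
decreasing_by all_goals omega

theorem go_key (n pv : Int) (hpv : 0 < pv) (hn : 0 ≤ n) :
    p1019AltGo n (10 * pv) (by omega) 0
      = 10 * p1019AltGo (n / 10) pv hpv 0 - (9 - n % 10) * dtail (n / 10) pv hpv := by
  by_cases h : pv ≤ n / 10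
  · have h' : 10 * pv ≤ n := by omega
    rw [go_step (by omega) h' 0,
      go_acc n ((10 * pv) * 10) (by omega) (0 + fB n (10 * pv)),
      go_congr (by omega) (show (10 : Int) * pv * 10 = 10 * (pv * 10) by ring),
      go_key n (pv * 10) (by omega) hn,
      go_step hpv h 0,
      go_acc (n / 10) (pv * 10) (by omega) (0 + fB (n / 10) pv),
      dtail_pos hpv h, fB_key hn hpv]
    ring
  · have h' : ¬ 10 * pv ≤ n := by omega
    rw [go_stop (by omega) h' 0, go_stop hpv h 0, dtail_neg hpv h]
    ring
termination_by (n + 1 - pv).toNat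
decreasing_by all_goals omega

theorem alt_eq_TT {n : Int} (hn : 0 ≤ n) : p1019_alt n = TT n := by
  show p1019AltGo n 1 (by norm_num) 0 = TT n
  by_cases h : (1 : Int) ≤ n
  · rw [go_step (by omega) h 0, go_acc n (1 * 10) (by omega) (0 + fB n 1)]
    rw [go_congr (by omega) (show (1 : Int) * 10 = 10 * 1 by ring)]
    rw [go_key n 1 (by omega) hn]
    have hrec : p1019AltGo (n / 10) 1 (by norm_num) 0 = TT (n / 10) :=
      alt_eq_TT (n := n / 10) (by omega)
    rw [hrec, dtail_one (n / 10) (by omega), TT_pos (show (0:Int) < n by omega)]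
    rw [fB_eq (by norm_num)]
    rw [Int.ediv_one, Int.emod_one]
    have hr2 : (n % 10) * ((n % 10) + 1) / 2 = (n % 10) * ((n % 10) - 1) / 2 + (n % 10) := by
      rw [show (n % 10) * ((n % 10) + 1) = (n % 10) * ((n % 10) - 1) + (n % 10) * 2 by ring,
        Int.add_mul_ediv_right _ _ (by norm_num : (2:Int) ≠ 0)]
    unfold gA
    rw [hr2]
    norm_num
    generalize (n % 10) * ((n % 10) - 1) / 2 = t
    generalize digSum (n / 10) = d
    ring
  · rw [go_stop (by omega) h, TT_nonpos (by omega)]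
termination_by n.toNat
decreasing_by all_goals omega


-- ===== VERDICT (by name: the statement is the Claim_ definition above) =====
theorem p1019_spec : Claim_equal_p1019 := by
  intro N _ hpre
  unfold Spec_p1019
  rw [p1019_eq_TT hpre, alt_eq_TT hpre]

@[simp]
theorem p1019_raises : Claim_raises_p1019 := by
  unfold Claim_raises_p1019
  constructor
  · intro N _ h; unfold Raises_p1019 at h; unfold Pre_p1019; omega
  · refine ⟨by decide, by decide, ?_⟩
    unfold p1019_alt pvRaiseWitness_p1019 pvRaiseWitnessOut_p1019
    rw [p1019AltGo]
    norm_num
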